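-- pv_equiv track=rewrite | github.com/Azure-Samples/azure-ai-content-understanding-python | python/di_to_cu_migration_tool/field_name_utils.py | _normalize_chars
-- ===== SOURCE A (Python) =====
-- ALLOWED_CHARS = set('abcdefghijklmnopqrstuvwxyzABCDEFGHIJKLMNOPQRSTUVWXYZ0123456789_')
--
-- def _normalize_chars(name: str) -> str:
--     """
--     Replace invalid characters with underscores and clean up the result.
--
--     Args:
--         name (str): The name to normalize.
--
--     Returns:
--         str: The normalized name with only valid characters.
--     """
--     result = []
--     prev_was_underscore = False
--
--     for char in name:
--         if char in ALLOWED_CHARS: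
--             prev_was_underscore = (char == '_')
--             result.append(char)
--         else:
--             # Replace invalid char with underscore, avoid consecutive underscores
--             if not prev_was_underscore:
--                 result.append('_')
--                 prev_was_underscore = True
--
--     # Join and clean up leading/trailing underscores
--     normalized = ''.join(result).strip('_')
--
--     # Remove any remaining consecutive underscores
--     while '__' in normalized:
--         normalized = normalized.replace('__', '_')
--
--     # Ensure name starts with letter or underscore (not a number)
--     if normalized and normalized[0].isdigit():
--         normalized = 'f_' + normalized
--
--     return normalized
-- ===== SOURCE B (Python) =====
-- ALLOWED_CHARS = set('abcdefghijklmnopqrstuvwxyzABCDEFGHIJKLMNOPQRSTUVWXYZ0123456789_')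
--
-- def _normalize_chars(name: str) -> str:
--     # Pass 1: map every disallowed character to '_'.
--     mapped = ''.join(c if c in ALLOWED_CHARS else '_' for c in name)
--     # Pass 2: split on '_' and rejoin the nonempty pieces: this collapses
--     # every underscore run to one and strips leading/trailing underscores.
--     s = '_'.join(p for p in mapped.split('_') if p)
--     return 'f_' + s if s and s[0].isdigit() else s
-- ===== Notes on version B (the rewrite author's own statement) =====
-- stated objective: simpler
-- what changed: A's single flag-carrying loop followed by an edge strip and a repeated double-underscore-replacing while loop is replaced by two plain passes: map every disallowed character to an underscore, then split on underscores and rejoin the nonempty pieces, which collapses underscore runs and strips the ends in one step.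
import Mathlib
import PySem

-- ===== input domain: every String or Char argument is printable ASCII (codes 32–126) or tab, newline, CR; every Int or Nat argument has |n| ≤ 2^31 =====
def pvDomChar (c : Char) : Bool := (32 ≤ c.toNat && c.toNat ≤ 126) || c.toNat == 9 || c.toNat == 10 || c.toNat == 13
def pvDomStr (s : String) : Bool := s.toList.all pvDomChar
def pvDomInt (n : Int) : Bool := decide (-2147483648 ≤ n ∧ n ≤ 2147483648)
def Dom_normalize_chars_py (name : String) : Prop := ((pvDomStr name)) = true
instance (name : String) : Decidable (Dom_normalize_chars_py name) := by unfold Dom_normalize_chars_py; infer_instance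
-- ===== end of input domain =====

-- B replaces A's flag-carrying loop plus edge strip plus repeated double-underscore replacement by two
-- plain passes: map every disallowed char to an underscore, then split on underscores and rejoin the
-- nonempty pieces (objective: simpler).

-- ALLOWED_CHARS (module-level Python set, shared by both versions)
def pvAllowedChars : List Char :=
  PySem.Set.ofList "abcdefghijklmnopqrstuvwxyzABCDEFGHIJKLMNOPQRSTUVWXYZ0123456789_".toList

-- ===== PORT A =====
-- the for-loop over name with the prev_was_underscore flag (result built front-to-back)
def pvALoop : List Char → Bool → List Char
  | [], _ => []
  | c :: t, prev =>
    if pvAllowedChars.contains c then c :: pvALoop t (c == '_')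
    else if prev then pvALoop t prev
    else '_' :: pvALoop t true

-- hand port of str.strip('_'): drop '_' from both ends (exact: leading pass, then trailing pass)
def pvStripLU (l : List Char) : List Char := l.dropWhile (· == '_')

def pvStripRU : List Char → List Char
  | [] => []
  | c :: t => if c == '_' && (pvStripRU t).isEmpty then [] else c :: pvStripRU t

-- hand port of str.replace('__', '_'): exact for this pattern (left-to-right, non-overlapping)
def pvReplaceDD : List Char → List Char
  | [] => []
  | [c] => [c]
  | a :: b :: t => if a == '_' && b == '_' then '_' :: pvReplaceDD t else a :: pvReplaceDD (b :: t)

-- hand port of `'__' in s`: exact substring test for this two-character pattern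
def pvHasDD : List Char → Bool
  | [] => false
  | [_] => false
  | a :: b :: t => (a == '_' && b == '_') || pvHasDD (b :: t)

theorem pvReplaceDD_length_le (l : List Char) : (pvReplaceDD l).length ≤ l.length := by
  induction l using pvReplaceDD.induct with
  | case1 => simp [pvReplaceDD]
  | case2 => simp [pvReplaceDD]
  | case3 a b t h ih => simp only [pvReplaceDD, if_pos h]; simpa using Nat.le_trans ih (by omega)
  | case4 a b t h ih => simp only [pvReplaceDD, if_neg h]; simpa using ih

theorem pvReplaceDD_length_lt (l : List Char) (h : pvHasDD l = true) :
    (pvReplaceDD l).length < l.length := by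
  induction l using pvReplaceDD.induct with
  | case1 => simp [pvHasDD] at h
  | case2 => simp [pvHasDD] at h
  | case3 a b t hc ih =>
      have := pvReplaceDD_length_le t
      simp only [pvReplaceDD, if_pos hc]; simp; omega
  | case4 a b t hc ih =>
      simp only [pvHasDD, hc, Bool.false_or] at h
      simp only [pvReplaceDD, if_neg hc]
      simpa using ih h

-- the `while '__' in normalized:` loop
def pvWhileReplace (l : List Char) : List Char :=
  if h : pvHasDD l then pvWhileReplace (pvReplaceDD l) else l
termination_by l.length
decreasing_by exact pvReplaceDD_length_lt l h

def normalize_chars_py (name : String) : String :=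
  let normalized := pvWhileReplace (pvStripRU (pvStripLU (pvALoop name.toList false)))
  String.mk (match normalized with
    | c :: _ => if PySem.Chars.isdigit c then 'f' :: '_' :: normalized else normalized
    | [] => normalized)

-- ===== PORT B =====
def normalize_chars_py_alt (name : String) : String :=
  let mapped := name.toList.map (fun c => if pvAllowedChars.contains c then c else '_')
  let s := List.intercalate ['_'] ((mapped.splitOn '_').filter (fun p => !p.isEmpty))
  String.mk (match s with
    | c :: _ => if PySem.Chars.isdigit c then 'f' :: '_' :: s else s
    | [] => s)

-- ===== PRECONDITION & SPEC =====
def Spec_normalize_chars_py (name : String) (out : String) : Prop := out = normalize_chars_py_alt name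
instance (name : String) (out : String) : Decidable (Spec_normalize_chars_py name out) := by unfold Spec_normalize_chars_py; infer_instance

-- ===== CLAIM (what is proved, stated in full; the proofs are below) =====
def Claim_equal_normalize_chars_py : Prop := ∀ (name : String), Dom_normalize_chars_py name → Spec_normalize_chars_py name (normalize_chars_py name)

-- ===== LEMMAS AND PROOFS =====

-- normal form: collapse every run of '_' to a single '_'
def pvColl : List Char → List Char
  | [] => []
  | [c] => [c]
  | a :: b :: t => if a == '_' && b == '_' then pvColl (b :: t) else a :: pvColl (b :: t)

theorem coll_uu (t : List Char) : pvColl ('_' :: '_' :: t) = pvColl ('_' :: t) := by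
  simp [pvColl]

theorem coll_cons_ne {c : Char} (h : c ≠ '_') (X : List Char) : pvColl (c :: X) = c :: pvColl X := by
  cases X with
  | nil => simp [pvColl]
  | cons b t => simp [pvColl, h]

theorem coll_head? (l : List Char) : (pvColl l).head? = l.head? := by
  induction l using pvColl.induct with
  | case1 => rfl
  | case2 => rfl
  | case3 a b t h ih =>
      obtain ⟨ha, hb⟩ : a = '_' ∧ b = '_' := by simpa [Bool.and_eq_true] using h
      subst ha; subst hb
      simpa [pvColl] using ih
  | case4 a b t h ih => simp [pvColl, h]

theorem coll_ne_nil {l : List Char} (h : l ≠ []) : pvColl l ≠ [] := by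
  intro hc
  have := coll_head? l
  rw [hc] at this
  cases l with
  | nil => exact h rfl
  | cons c t => simp at this

theorem coll_ub {b : Char} (hb : b ≠ '_') (t : List Char) :
    pvColl ('_' :: b :: t) = '_' :: pvColl (b :: t) := by
  simp [pvColl, hb]

theorem coll_replaceDD (l : List Char) :
    pvColl (pvReplaceDD l) = pvColl l ∧ pvColl ('_' :: pvReplaceDD l) = pvColl ('_' :: l) := by
  induction l using pvReplaceDD.induct with
  | case1 => simp [pvReplaceDD]
  | case2 => simp [pvReplaceDD]
  | case3 a b t h ih =>
      obtain ⟨ha, hb⟩ : a = '_' ∧ b = '_' := by simpa using h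
      subst ha; subst hb
      simp only [pvReplaceDD, if_pos h]
      refine ⟨by rw [coll_uu]; exact ih.2, ?_⟩
      rw [coll_uu, coll_uu, coll_uu]
      exact ih.2
  | case4 a b t h ih =>
      simp only [pvReplaceDD, if_neg h]
      by_cases hA : a = '_'
      · have hB : b ≠ '_' := fun hB => h (by simp [hA, hB])
        subst hA
        refine ⟨ih.2, ?_⟩
        rw [coll_uu, coll_uu]
        exact ih.2
      · constructor
        · obtain ⟨R, hR⟩ : ∃ R, pvReplaceDD (b :: t) = R := ⟨_, rfl⟩
          rw [hR, coll_cons_ne hA, coll_cons_ne hA, ← hR, ih.1]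
        · rw [coll_ub hA, coll_ub hA, coll_cons_ne hA, coll_cons_ne hA, ih.1]

theorem coll_fix {l : List Char} (h : pvHasDD l = false) : pvColl l = l := by
  induction l using pvColl.induct with
  | case1 => rfl
  | case2 => rfl
  | case3 a b t hc ih => simp [pvHasDD, hc] at h
  | case4 a b t hc ih =>
      have h2 : pvHasDD (b :: t) = false := by
        simp only [pvHasDD, Bool.or_eq_false_iff] at h
        exact h.2
      simp only [pvColl, if_neg (by simp [hc] : ¬ ((a == '_' && b == '_') = true))]
      rw [ih h2]

theorem pvWhileReplace_eq_coll (l : List Char) : pvWhileReplace l = pvColl l := by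
  rw [pvWhileReplace]
  split_ifs with h
  · rw [pvWhileReplace_eq_coll (pvReplaceDD l), (coll_replaceDD l).1]
  · exact (coll_fix (by simpa using h)).symm
termination_by l.length
decreasing_by exact pvReplaceDD_length_lt l h

theorem stripL_coll (l : List Char) : pvStripLU (pvColl l) = pvColl (pvStripLU l) := by
  induction l using pvColl.induct with
  | case1 => rfl
  | case2 c => by_cases h : c = '_' <;> simp [pvColl, pvStripLU, h]
  | case3 a b t h ih =>
      obtain ⟨ha, hb⟩ : a = '_' ∧ b = '_' := by simpa using h
      subst ha; subst hb
      rw [coll_uu, ih]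
      simp [pvStripLU]
  | case4 a b t h ih =>
      by_cases hA : a = '_'
      · have hB : b ≠ '_' := fun hB => h (by simp [hA, hB])
        subst hA
        rw [coll_ub hB]
        simp only [pvStripLU] at ih ⊢
        simp only [List.dropWhile_cons, beq_self_eq_true, if_pos (by simp : ('_' == '_') = true)]
        rw [ih]
        simp [List.dropWhile_cons, hB]
      · rw [coll_cons_ne hA]
        simp only [pvStripLU, List.dropWhile_cons]
        simp only [show (a == '_') = false by simpa using hA, Bool.false_eq_true, if_false]
        rw [coll_cons_ne hA]

theorem stripRU_cons_ne {c : Char} (hc : c ≠ '_') (t : List Char) :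
    pvStripRU (c :: t) = c :: pvStripRU t := by
  simp [pvStripRU, hc]

theorem stripRU_cons_u (t : List Char) :
    pvStripRU ('_' :: t) = if pvStripRU t = [] then [] else '_' :: pvStripRU t := by
  simp [pvStripRU, List.isEmpty_iff]

theorem stripR_coll (l : List Char) : pvStripRU (pvColl l) = pvColl (pvStripRU l) := by
  induction l using pvColl.induct with
  | case1 => rfl
  | case2 c => by_cases h : c = '_' <;> simp [pvColl, pvStripRU, h]
  | case3 a b t h ih =>
      obtain ⟨ha, hb⟩ : a = '_' ∧ b = '_' := by simpa using h
      subst ha; subst hb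
      rw [coll_uu, ih, stripRU_cons_u ('_' :: t)]
      by_cases he : pvStripRU ('_' :: t) = []
      · simp [he, pvColl]
      · rw [if_neg he]
        have ht : pvStripRU t ≠ [] := by
          intro h0
          exact he (by rw [stripRU_cons_u, if_pos h0])
        rw [stripRU_cons_u, if_neg ht, coll_uu]
  | case4 a b t h ih =>
      by_cases hA : a = '_'
      · have hB : b ≠ '_' := fun hB => h (by simp [hA, hB])
        subst hA
        rw [coll_ub hB]
        have hbt : pvStripRU (b :: t) = b :: pvStripRU t := stripRU_cons_ne hB t
        have hcoll_ne : pvColl (pvStripRU (b :: t)) ≠ [] := by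
          rw [hbt]; exact coll_ne_nil (by simp)
        have hs : pvStripRU (pvColl (b :: t)) ≠ [] := by rw [ih]; exact hcoll_ne
        rw [stripRU_cons_u, if_neg hs, ih]
        rw [stripRU_cons_u, if_neg (by rw [hbt]; simp)]
        rw [hbt, coll_ub hB]
      · rw [coll_cons_ne hA, stripRU_cons_ne hA, ih, stripRU_cons_ne hA, coll_cons_ne hA]

theorem coll_aLoop (l : List Char) :
    pvColl (pvALoop l false) = pvColl (l.map (fun c => if pvAllowedChars.contains c then c else '_')) ∧
    pvColl ('_' :: pvALoop l true) = pvColl ('_' :: l.map (fun c => if pvAllowedChars.contains c then c else '_')) := by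
  induction l with
  | nil => exact ⟨rfl, rfl⟩
  | cons c t ih =>
      by_cases hc : pvAllowedChars.contains c
      · by_cases hcu : c = '_'
        · subst hcu
          simp only [pvALoop, if_pos hc, List.map_cons, if_pos hc, beq_self_eq_true]
          exact ⟨ih.2, by rw [coll_uu, coll_uu]; exact ih.2⟩
        · have hb : (c == '_') = false := by simpa using hcu
          simp only [pvALoop, if_pos hc, List.map_cons, if_pos hc, hb]
          refine ⟨?_, ?_⟩
          · rw [coll_cons_ne hcu, coll_cons_ne hcu, ih.1]
          · rw [coll_ub hcu, coll_ub hcu, coll_cons_ne hcu, coll_cons_ne hcu, ih.1]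
      · simp only [pvALoop, if_neg hc, List.map_cons, if_neg hc, if_pos trivial]
        refine ⟨ih.2, ?_⟩
        rw [coll_uu]
        exact ih.2

-- the word decomposition port B is built on
def pvW (l : List Char) : List (List Char) := (l.splitOn '_').filter (fun p => !p.isEmpty)

theorem W_nil : pvW [] = [] := rfl

theorem W_u (t : List Char) : pvW ('_' :: t) = pvW t := by
  simp [pvW, List.splitOn, List.splitOnP_cons]

theorem W_mem_ne_nil {l : List Char} {p : List Char} (h : p ∈ pvW l) : p ≠ [] := by
  have := (List.mem_filter.mp h).2
  simpa [List.isEmpty_iff] using this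

theorem W_cons {c : Char} (hc : c ≠ '_') (t : List Char) :
    pvW (c :: t) = (c :: t.takeWhile (fun x => !(x == '_'))) :: pvW (t.dropWhile (fun x => !(x == '_'))) := by
  induction t generalizing c with
  | nil => simp [pvW, List.splitOn, List.splitOnP_cons, List.splitOnP_nil, hc]
  | cons d t' ih =>
      by_cases hd : d = '_'
      · subst hd
        simp only [List.takeWhile_cons, List.dropWhile_cons, beq_self_eq_true, Bool.not_true,
          Bool.false_eq_true, if_false]
        simp only [pvW, List.splitOn, List.splitOnP_cons, show ((c : Char) == '_') = false by simpa using hc,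
          show (('_' : Char) == '_') = true from by simp, Bool.false_eq_true, if_false, if_true]
        simp [List.filter]
      · have h1 := ih hd
        obtain ⟨h0, hs0, hsp⟩ : ∃ h0 hs0, t'.splitOnP (· == '_') = h0 :: hs0 := by
          rcases he : t'.splitOnP (· == '_') with _ | ⟨h0, hs0⟩
          · exact absurd he (List.splitOnP_ne_nil _ _)
          · exact ⟨h0, hs0, rfl⟩
        have hsd : (d :: t').splitOnP (· == '_') = (d :: h0) :: hs0 := by
          rw [List.splitOnP_cons, if_neg (by simpa using hd : ¬ ((d == '_') = true)), hsp]
          rfl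
        have hcd : (c :: d :: t').splitOnP (· == '_') = (c :: d :: h0) :: hs0 := by
          rw [List.splitOnP_cons, if_neg (by simpa using hc : ¬ ((c == '_') = true)), hsd]
          rfl
        have h1' : (d :: h0) :: hs0.filter (fun p => !p.isEmpty) =
            (d :: t'.takeWhile (fun x => !(x == '_'))) :: pvW (t'.dropWhile (fun x => !(x == '_'))) := by
          rw [← h1]
          simp [pvW, List.splitOn, hsd, List.filter]
        have hh : h0 = t'.takeWhile (fun x => !(x == '_')) := by
          have := (List.cons.injEq _ _ _ _).mp h1'
          exact (List.cons.injEq _ _ _ _).mp this.1 |>.2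
        have ht : hs0.filter (fun p => !p.isEmpty) = pvW (t'.dropWhile (fun x => !(x == '_'))) :=
          ((List.cons.injEq _ _ _ _).mp h1').2
        have hW : pvW (c :: d :: t') = (c :: d :: h0) :: hs0.filter (fun p => !p.isEmpty) := by
          simp [pvW, List.splitOn, hcd, List.filter]
        rw [hW, hh, ht]
        simp [List.takeWhile_cons, List.dropWhile_cons, hd]

theorem W_dropU (r : List Char) : pvW (pvStripLU r) = pvW r := by
  induction r with
  | nil => rfl
  | cons c t ih =>
      by_cases hc : c = '_'
      · subst hc
        simp only [pvStripLU, List.dropWhile_cons, beq_self_eq_true, if_true]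
        rw [show (List.dropWhile (fun x => x == '_') t) = pvStripLU t from rfl, ih, W_u]
      · simp [pvStripLU, List.dropWhile_cons, hc]

theorem coll_seg_append {s : List Char} (h : ∀ c ∈ s, c ≠ '_') (z : List Char) :
    pvColl (s ++ z) = s ++ pvColl z := by
  induction s with
  | nil => rfl
  | cons c s' ih =>
      rw [List.cons_append, coll_cons_ne (h c (by simp)), ih (fun x hx => h x (by simp [hx]))]
      rfl

theorem stripR_seg_append {s : List Char} (h : ∀ c ∈ s, c ≠ '_') (z : List Char) :
    pvStripRU (s ++ z) = s ++ pvStripRU z := by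
  induction s with
  | nil => rfl
  | cons c s' ih =>
      rw [List.cons_append, stripRU_cons_ne (h c (by simp)), ih (fun x hx => h x (by simp [hx]))]
      rfl

theorem coll_us (r : List Char) : pvColl ('_' :: r) = '_' :: pvColl (pvStripLU r) := by
  induction r with
  | nil => rfl
  | cons c r' ih =>
      by_cases hc : c = '_'
      · subst hc
        rw [coll_uu, ih]
        simp [pvStripLU]
      · rw [coll_ub hc]
        simp [pvStripLU, List.dropWhile_cons, hc]

theorem intercalate_cons' (sep : List Char) (x : List Char) (xs : List (List Char)) :
    List.intercalate sep (x :: xs) = x ++ if xs = [] then [] else sep ++ List.intercalate sep xs := by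
  cases xs with
  | nil => simp [List.intercalate]
  | cons y ys => simp [List.intercalate, List.intersperse]

theorem intercalate_W_eq_nil_iff (l : List Char) :
    List.intercalate ['_'] (pvW l) = [] ↔ pvW l = [] := by
  constructor
  · intro h
    rcases hw : pvW l with _ | ⟨w, ws⟩
    · rfl
    · rw [hw, intercalate_cons'] at h
      have hwne : w ≠ [] := W_mem_ne_nil (by rw [hw]; simp)
      rcases w with _ | ⟨a, b⟩
      · exact absurd rfl hwne
      · simp at h
  · intro h; rw [h]; rfl

theorem dropWhile_head_false {p : Char → Bool} {l : List Char} {e : Char} {r : List Char}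
    (h : l.dropWhile p = e :: r) : p e = false := by
  induction l with
  | nil => simp at h
  | cons c t ih =>
      rw [List.dropWhile_cons] at h
      by_cases hp : p c
      · rw [if_pos hp] at h; exact ih h
      · rw [if_neg hp] at h
        obtain ⟨rfl, -⟩ := (List.cons.injEq _ _ _ _).mp h
        simpa using hp

theorem stripLU_idem (l : List Char) : pvStripLU (pvStripLU l) = pvStripLU l :=
  List.dropWhile_idempotent _ _

theorem pv_star (x : List Char) :
    List.intercalate ['_'] (pvW x) = pvStripRU (pvStripLU (pvColl x)) := by
  cases x with
  | nil => rfl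
  | cons c t =>
      by_cases hc : c = '_'
      · subst hc
        rw [W_u, pv_star t, stripL_coll t, stripL_coll ('_' :: t),
          show pvStripLU ('_' :: t) = pvStripLU t from by simp [pvStripLU]]
      · rw [W_cons hc, intercalate_cons']
        have hseg : ∀ y ∈ t.takeWhile (fun x => !(x == '_')), y ≠ '_' := by
          intro y hy
          simpa using List.mem_takeWhile_imp hy
        have ht : t = t.takeWhile (fun x => !(x == '_')) ++ t.dropWhile (fun x => !(x == '_')) :=
          (List.takeWhile_append_dropWhile).symm
        have hcoll : pvColl (c :: t) = c :: (t.takeWhile (fun x => !(x == '_')) ++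
            pvColl (t.dropWhile (fun x => !(x == '_')))) := by
          rw [coll_cons_ne hc]
          conv_lhs => rw [ht]
          rw [coll_seg_append hseg]
        rw [hcoll]
        rw [show pvStripLU (c :: (t.takeWhile (fun x => !(x == '_')) ++
            pvColl (t.dropWhile (fun x => !(x == '_'))))) = c :: (t.takeWhile (fun x => !(x == '_')) ++
            pvColl (t.dropWhile (fun x => !(x == '_')))) from by
          simp [pvStripLU, List.dropWhile_cons, hc]]
        rw [stripRU_cons_ne hc, stripR_seg_append hseg]
        rw [List.cons_append]
        congr 1
        congr 1
        -- remaining: the underscore-run tail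
        rcases hd : t.dropWhile (fun x => !(x == '_')) with _ | ⟨e, r⟩
        · simp [W_nil, pvColl, pvStripRU]
        · have he : e = '_' := by simpa using dropWhile_head_false hd
          subst he
          rw [W_u, coll_us, stripRU_cons_u]
          have hrec := pv_star (pvStripLU r)
          rw [stripL_coll (pvStripLU r), stripLU_idem r, W_dropU r] at hrec
          rw [← hrec]
          by_cases hwr : pvW r = []
          · rw [if_pos hwr, if_pos ((intercalate_W_eq_nil_iff r).mpr hwr)]
          · rw [if_neg hwr, if_neg (fun h => hwr ((intercalate_W_eq_nil_iff r).mp h))]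
            rfl
termination_by x.length
decreasing_by
  · simp
  · have h1 : (pvStripLU r).length ≤ r.length := List.length_dropWhile_le _ _
    have h2 : r.length < (t.dropWhile (fun x => !(x == '_'))).length := by rw [hd]; simp
    have h3 : (t.dropWhile (fun x => !(x == '_'))).length ≤ t.length := List.length_dropWhile_le _ _
    simp
    omega

-- ===== VERDICT (by name: the statement is the Claim_ definition above) =====
theorem normalize_chars_py_spec : Claim_equal_normalize_chars_py := by
  intro name _
  unfold Spec_normalize_chars_py normalize_chars_py normalize_chars_py_alt
  have h : pvWhileReplace (pvStripRU (pvStripLU (pvALoop name.toList false))) =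
      List.intercalate ['_']
        (((name.toList.map (fun c => if pvAllowedChars.contains c then c else '_')).splitOn '_').filter
          (fun p => !p.isEmpty)) := by
    rw [pvWhileReplace_eq_coll, ← stripR_coll, ← stripL_coll, (coll_aLoop name.toList).1, ← pv_star]
    rfl
  simp only [h]
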